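-- pv_equiv track=rewrite | github.com/jonkaya/adventofcode | 2021/Day16/part2.py | get_literal
-- ===== SOURCE A (Python) =====
-- from typing import List, Tuple
--
-- def bin_to_decimal(bin: List[str]) -> int:
--     total: int = 0
--     i: int = 0
--
--     for digit in reversed(bin):
--         if digit == "1":
--             total += 2 ** i
--         i += 1
--     return total
--
-- def get_literal(buffer: List[str]) -> Tuple[int, List[str]]:
--     literal: List[str] = list()
--
--     while buffer:
--         literal.extend(buffer[1:5])
--
--         if buffer[0] == "0":
--             del buffer[:5]
--             break
--         del buffer[:5]
--     return bin_to_decimal(literal), buffer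
-- ===== SOURCE B (Python) =====
-- def get_literal(buffer):
--     # Two-stage decomposition: first walk the buffer by index collecting the
--     # payload bits of each 5-bit group (stopping after a group flagged '0'),
--     # then compute the value as a sum of positional powers of two.
--     # Mutates buffer in place (one del) like the original.
--     groups = []
--     i = 0
--     while i < len(buffer):
--         chunk = buffer[i:i + 5]
--         groups.extend(chunk[1:])
--         i += 5
--         if chunk[0] == "0":
--             break
--     del buffer[:i]
--     n = len(groups)
--     value = sum(2 ** (n - 1 - j) for j, b in enumerate(groups) if b == "1")
--     return value, buffer
-- ===== Notes on version B (the rewrite author's own statement) =====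
-- stated objective: faster
-- what changed: Replaces the destructive while loop (one O(n) `del buffer[:5]` per group) and the bin_to_decimal fold with a two-stage decomposition: an index walk collects the payload bits of each 5-bit group, a single final `del buffer[:i]`, then the value is a sum of positional powers of two over enumerate(groups).
import Mathlib
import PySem

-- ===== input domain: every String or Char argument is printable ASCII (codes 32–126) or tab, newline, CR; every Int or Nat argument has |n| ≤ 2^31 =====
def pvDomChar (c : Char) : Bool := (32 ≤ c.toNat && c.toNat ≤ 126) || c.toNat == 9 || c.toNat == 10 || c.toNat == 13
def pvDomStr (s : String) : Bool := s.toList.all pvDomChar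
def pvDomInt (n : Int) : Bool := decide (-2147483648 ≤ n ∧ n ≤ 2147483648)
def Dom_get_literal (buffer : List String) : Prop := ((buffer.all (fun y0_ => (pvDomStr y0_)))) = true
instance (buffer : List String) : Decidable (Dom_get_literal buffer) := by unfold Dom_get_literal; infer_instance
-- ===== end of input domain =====

-- B uses a different decomposition: first collect the payload bits of each 5-bit group, then the value
-- is a sum of positional powers of two (no digit-list + bin_to_decimal fold). Both Pythons mutate
-- `buffer` in place identically; the equivalence proved is about the return value.


-- ===== PORT A =====
-- for digit in reversed(bin): if digit == "1": total += 2**i; i += 1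
def bin_to_decimal (bin : List String) : Int :=
  (bin.reverse.foldl
    (fun (st : Int × Nat) digit =>
      (if digit = "1" then st.1 + 2 ^ st.2 else st.1, st.2 + 1)) (0, 0)).1

-- while buffer: literal.extend(buffer[1:5]); if buffer[0]=="0": del buffer[:5]; break; del buffer[:5]
-- (buffer[1:5] with nonnegative bounds = (drop 1).take 4; del buffer[:5] = drop 5)
def getLitLoopA : List String → List String → List String × List String
  | [], literal => (literal, [])
  | b0 :: rest, literal =>
    let literal' := literal ++ ((b0 :: rest).drop 1).take 4
    if b0 = "0" then (literal', (b0 :: rest).drop 5)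
    else getLitLoopA ((b0 :: rest).drop 5) literal'
termination_by buffer _ => buffer.length
decreasing_by simp [List.length_drop]

def get_literal (buffer : List String) : Int × List String :=
  let r := getLitLoopA buffer []
  (bin_to_decimal r.1, r.2)

-- ===== PORT B =====
-- while i < len(buffer): chunk = buffer[i:i+5]; groups.extend(chunk[1:]); i += 5; if chunk[0]=="0": break
-- (index loop over an unchanged list = structural recursion on the drop; returns (groups, i))
def collectGroups : List String → List String × Nat
  | [] => ([], 0)
  | b0 :: rest =>
    let chunk := (b0 :: rest).take 5
    if b0 = "0" then (chunk.drop 1, 5)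
    else
      let r := collectGroups ((b0 :: rest).drop 5)
      (chunk.drop 1 ++ r.1, r.2 + 5)
termination_by buffer => buffer.length
decreasing_by simp [List.length_drop]

-- value = sum(2**(n-1-j) for j, b in enumerate(groups) if b == "1"); the exponent n-1-j is
-- nonnegative (j < n), so .toNat is exact here.
def get_literal_alt (buffer : List String) : Int × List String :=
  let r := collectGroups buffer
  let n : Int := r.1.length
  (((PySem.List.enumerate r.1).filterMap
      (fun p => if p.2 = "1" then some ((2 : Int) ^ (n - 1 - p.1).toNat) else none)).sum,
   buffer.drop r.2)

-- ===== PRECONDITION & SPEC =====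
def Spec_get_literal (buffer : List String) (out : Int × List String) : Prop := out = get_literal_alt buffer
instance (buffer : List String) (out : Int × List String) : Decidable (Spec_get_literal buffer out) := by unfold Spec_get_literal; infer_instance

-- ===== CLAIM (what is proved, stated in full; the proofs are below) =====
def Claim_equal_get_literal : Prop := ∀ (buffer : List String), Dom_get_literal buffer → Spec_get_literal buffer (get_literal buffer)

-- ===== LEMMAS AND PROOFS =====
-- positional value of a bit list (proof-only helper)
def W : List String → Int
  | [] => 0
  | d :: t => (if d = "1" then (2 : Int) ^ t.length else 0) + W t

def chunkVal (value : Int) (bits : List String) : Int :=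
  bits.foldl (fun v d => v * 2 + (if d = "1" then 1 else 0)) value

theorem chunkVal_eq_W (l : List String) : ∀ v : Int, chunkVal v l = v * 2 ^ l.length + W l := by
  induction l with
  | nil => intro v; simp [chunkVal, W]
  | cons d t ih =>
    intro v
    have : chunkVal v (d :: t) = chunkVal (v * 2 + (if d = "1" then 1 else 0)) t := rfl
    rw [this, ih]
    simp [W, List.length_cons, pow_succ]
    split <;> ring

theorem bin_to_decimal_aux (rl : List String) (t : Int) (i : Nat) :
    (rl.foldl
      (fun (st : Int × Nat) digit =>
        (if digit = "1" then st.1 + 2 ^ st.2 else st.1, st.2 + 1)) (t, i)).1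
      = t + chunkVal 0 rl.reverse * 2 ^ i := by
  induction rl generalizing t i with
  | nil => simp [chunkVal]
  | cons d rs ih =>
    simp only [List.foldl_cons, List.reverse_cons]
    rw [ih]
    have h : chunkVal 0 (rs.reverse ++ [d]) = chunkVal 0 rs.reverse * 2 + (if d = "1" then 1 else 0) := by
      simp [chunkVal, List.foldl_append]
    rw [h]
    split <;> ring

theorem bin_to_decimal_eq_W (l : List String) : bin_to_decimal l = W l := by
  unfold bin_to_decimal
  rw [bin_to_decimal_aux]
  simp only [List.reverse_reverse, pow_zero, mul_one, zero_add]
  rw [chunkVal_eq_W]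
  simp

theorem sum_enumerate_eq_W (n : Int) (l : List String) : ∀ s : Int, 0 ≤ s → s + l.length = n →
    ((PySem.List.enumerate l s).filterMap
      (fun p => if p.2 = "1" then some ((2 : Int) ^ (n - 1 - p.1).toNat) else none)).sum = W l := by
  induction l with
  | nil => intro s _ _; simp [PySem.List.enumerate_nil, W]
  | cons d t ih =>
    intro s hs hn
    rw [PySem.List.enumerate_cons]
    have hexp : (n - 1 - s).toNat = t.length := by
      simp [List.length_cons] at hn; omega
    have ht := ih (s + 1) (by omega) (by simp [List.length_cons] at hn ⊢; omega)
    by_cases hd : d = "1" <;> simp [hd, W, ht, hexp]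

theorem loopA_eq_collect (m : Nat) : ∀ (buffer literal : List String), buffer.length ≤ m →
    getLitLoopA buffer literal
      = (literal ++ (collectGroups buffer).1, buffer.drop (collectGroups buffer).2) := by
  induction m with
  | zero =>
    intro buffer literal hlen
    have : buffer = [] := List.length_eq_zero_iff.mp (Nat.le_zero.mp hlen)
    subst this
    rw [getLitLoopA, collectGroups]; simp
  | succ m ih =>
    intro buffer literal hlen
    match buffer with
    | [] => rw [getLitLoopA, collectGroups]; simp
    | b0 :: rest =>
      rw [getLitLoopA, collectGroups]
      by_cases h : b0 = "0"
      · simp [h, List.drop_take]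
      · simp only [h, if_false]
        rw [ih ((b0 :: rest).drop 5) _ (by simp at hlen ⊢; omega)]
        simp [List.drop_take, List.drop_drop, List.append_assoc]
        congr 1
        omega

-- ===== VERDICT (by name: the statement is the Claim_ definition above) =====
theorem get_literal_spec : Claim_equal_get_literal := by
  intro buffer _
  unfold Spec_get_literal get_literal get_literal_alt
  rw [loopA_eq_collect buffer.length buffer [] le_rfl]
  simp only [List.nil_append]
  refine Prod.ext ?_ rfl
  simp only
  rw [bin_to_decimal_eq_W]
  exact (sum_enumerate_eq_W _ _ 0 le_rfl (by simp)).symm
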